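-- pv_equiv track=rewrite | github.com/makemakeway/myworks | c/자가진단.py | solution_0
-- ===== SOURCE A (Python) =====
-- def solution_0(arr):
--     answer = []
--     arr = sorted(arr)           #오름차순 순서로 정렬
--     done = []
--     for nbr in arr:             #arr의 원소를 순환
--         if nbr in done:         #done에 있는 숫자는 중복 개수를 센 것이므로, 다음 원소로 진행
--             continue
--         cnt = arr.count(nbr)
--         if cnt > 1:             #cnt가 1보다 크다는것은 중복이 있다는 것
--             answer.append(cnt)  #answer에 cnt를 원소로 추가시켜줌
--             done.append(nbr)    #현재 확인한 숫자를 done에 추가시켜줌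
--     if answer == []:
--         answer.append(-1)       #중복이 없을 경우, -1을 원소로 추가시켜줌
--     return answer
-- ===== SOURCE B (Python) =====
-- def solution_0(arr):
--     answer = []
--     s = sorted(arr)
--     i = 0
--     n = len(s)
--     while i < n:                      # one linear sweep over the sorted list
--         j = i + 1
--         while j < n and s[j] == s[i]: # extend the run of equal values
--             j += 1
--         if j - i > 1:                 # run longer than 1 -> a duplicated value
--             answer.append(j - i)
--         i = j
--     if not answer:
--         answer.append(-1)
--     return answer
-- ===== Notes on version B (the rewrite author's own statement) =====
-- stated objective: faster
-- what changed: Replaces A's per-element full-list count() plus a 'done' membership list with a single linear sweep over the sorted list that measures each run of equal values once.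
import Mathlib
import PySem

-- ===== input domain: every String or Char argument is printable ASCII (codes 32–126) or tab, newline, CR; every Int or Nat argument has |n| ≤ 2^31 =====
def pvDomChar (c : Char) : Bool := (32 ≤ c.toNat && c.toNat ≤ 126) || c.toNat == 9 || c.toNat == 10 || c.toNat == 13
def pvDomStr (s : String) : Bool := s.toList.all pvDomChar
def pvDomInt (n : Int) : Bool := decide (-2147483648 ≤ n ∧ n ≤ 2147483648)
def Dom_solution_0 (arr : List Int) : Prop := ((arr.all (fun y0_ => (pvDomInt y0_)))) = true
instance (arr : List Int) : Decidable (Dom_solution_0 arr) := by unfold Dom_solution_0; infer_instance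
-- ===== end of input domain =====

-- B replaces A's per-element count()/done scans by one linear sweep over the sorted list (faster).

-- ===== PORT A =====
-- the for-loop over the sorted list, with the full sorted list `arr` fixed for count()
def loopA (arr : List Int) : List Int → List Int → List Int → List Int
  | [], ans, _ => ans
  | n :: rest, ans, done =>
    if n ∈ done then loopA arr rest ans done
    else
      let c : Int := (arr.count n : Int)
      if 1 < c then loopA arr rest (ans ++ [c]) (done ++ [n])
      else loopA arr rest ans done

def solution_0 (arr : List Int) : List Int :=
  let a := PySem.List.sorted arr (fun x => x) false
  let ans := loopA a a [] []
  if ans = [] then [-1] else ans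

-- ===== PORT B =====
-- the outer while loop of Source B: each step consumes one run of equal values
def sweep : List Int → List Int
  | [] => []
  | x :: xs =>
    let t := xs.takeWhile (· == x)          -- the inner while loop: extend the run
    let rest := xs.dropWhile (· == x)
    if 0 < t.length then ((t.length + 1 : Nat) : Int) :: sweep rest
    else sweep rest
termination_by l => l.length
decreasing_by
  all_goals exact Nat.lt_succ_of_le (List.length_dropWhile_le _ _)

def solution_0_alt (arr : List Int) : List Int :=
  let ans := sweep (PySem.List.sorted arr (fun x => x) false)
  if ans = [] then [-1] else ans

-- ===== PRECONDITION & SPEC =====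
def Spec_solution_0 (arr : List Int) (out : List Int) : Prop := out = solution_0_alt arr
instance (arr : List Int) (out : List Int) : Decidable (Spec_solution_0 arr out) := by unfold Spec_solution_0; infer_instance

-- ===== CLAIM (what is proved, stated in full; the proofs are below) =====
def Claim_equal_solution_0 : Prop := ∀ (arr : List Int), Dom_solution_0 arr → Spec_solution_0 arr (solution_0 arr)

-- ===== LEMMAS AND PROOFS =====

-- loopA only reads `arr` through counts of the elements it visits
theorem loopA_count_congr (arr arr' : List Int) :
    ∀ (xs ans done : List Int), (∀ n ∈ xs, arr.count n = arr'.count n) →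
      loopA arr xs ans done = loopA arr' xs ans done := by
  intro xs
  induction xs with
  | nil => intro ans done h; rfl
  | cons n rest ih =>
    intro ans done h
    have hn : arr.count n = arr'.count n := h n (by simp)
    have hrest : ∀ m ∈ rest, arr.count m = arr'.count m := fun m hm => h m (by simp [hm])
    simp only [loopA, hn]
    split_ifs <;> exact ih _ _ hrest

-- loopA only reads `done` through membership of the elements it visits
theorem loopA_done_congr (arr : List Int) :
    ∀ (xs ans done done' : List Int), (∀ n ∈ xs, (n ∈ done ↔ n ∈ done')) →
      loopA arr xs ans done = loopA arr xs ans done' := by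
  intro xs
  induction xs with
  | nil => intro ans done done' h; rfl
  | cons n rest ih =>
    intro ans done done' h
    have hn : (n ∈ done ↔ n ∈ done') := h n (by simp)
    have hrest : ∀ m ∈ rest, (m ∈ done ↔ m ∈ done') := fun m hm => h m (by simp [hm])
    simp only [loopA]
    by_cases hm : n ∈ done
    · rw [if_pos hm, if_pos (hn.mp hm)]; exact ih _ _ _ hrest
    · rw [if_neg hm, if_neg (fun hx => hm (hn.mpr hx))]
      split_ifs
      · exact ih _ _ _ (fun m hm' => by simp [hrest m hm'])
      · exact ih _ _ _ hrest

-- elements already in `done` are skipped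
theorem loopA_skip (arr : List Int) :
    ∀ (t rest ans done : List Int), (∀ n ∈ t, n ∈ done) →
      loopA arr (t ++ rest) ans done = loopA arr rest ans done := by
  intro t
  induction t with
  | nil => intro rest ans done _; rfl
  | cons n t' ih =>
    intro rest ans done h
    simp only [List.cons_append, loopA, if_pos (h n (by simp))]
    exact ih _ _ _ (fun m hm => h m (by simp [hm]))


-- head of dropWhile fails the predicate; combined with sortedness, every element after the run exceeds x
theorem dropWhile_gt (x : Int) (xs : List Int) (hp : xs.Pairwise (· ≤ ·))
    (hle : ∀ n ∈ xs, x ≤ n) :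
    ∀ n ∈ xs.dropWhile (· == x), x < n := by
  cases hd : xs.dropWhile (· == x) with
  | nil => intro n hn; simp at hn
  | cons y d' =>
    intro n hn
    have hsub : (xs.dropWhile (· == x)).Sublist xs := List.dropWhile_sublist _
    have hpd : (y :: d').Pairwise (· ≤ ·) := hd ▸ hp.sublist hsub
    have hymem : y ∈ xs := hsub.mem (by rw [hd]; simp)
    have hy : ((· == x) y) = false := by
      have := List.head?_dropWhile_not (· == x) xs
      rw [hd] at this; simpa using this
    have hyne : y ≠ x := by simpa using hy
    have hxy : x < y := lt_of_le_of_ne (hle y hymem) (Ne.symm hyne)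
    rcases List.mem_cons.mp hn with hn | hn
    · exact hn ▸ hxy
    · exact lt_of_lt_of_le hxy ((List.pairwise_cons.mp hpd).1 n hn)

theorem loopA_eq_sweep :
    ∀ (N : Nat) (l : List Int), l.length ≤ N → l.Pairwise (· ≤ ·) →
      ∀ ans, loopA l l ans [] = ans ++ sweep l := by
  intro N
  induction N with
  | zero =>
    intro l hl _ ans
    rw [List.length_eq_zero_iff.mp (Nat.le_zero.mp hl)]
    simp only [sweep.eq_def, loopA, List.append_nil]
  | succ m ih =>
    intro l hl hp ans
    cases l with
    | nil => simp only [sweep.eq_def, loopA, List.append_nil]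
    | cons x xs =>
      have hxs : xs.takeWhile (· == x) ++ xs.dropWhile (· == x) = xs :=
        List.takeWhile_append_dropWhile
      set t := xs.takeWhile (· == x) with ht_def
      set d := xs.dropWhile (· == x) with hd_def
      have hpc := List.pairwise_cons.mp hp
      have ht : ∀ n ∈ t, n = x := by
        intro n hn
        have := List.mem_takeWhile_imp hn
        simpa using this
      have hdgt : ∀ n ∈ d, x < n := dropWhile_gt x xs hpc.2 hpc.1
      have hxd : x ∉ d := fun h => absurd (hdgt x h) (lt_irrefl x)
      have hcount_t : t.count x = t.length :=
        List.count_eq_length.mpr (fun b hb => ((ht b hb).symm : x = b))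
      have hcount_d : d.count x = 0 := List.count_eq_zero.mpr hxd
      have hcx : (x :: xs).count x = t.length + 1 := by
        conv_lhs => rw [← hxs]
        simp [List.count_append, hcount_t, hcount_d]
      have hcd : ∀ n ∈ d, (x :: xs).count n = d.count n := by
        intro n hn
        have hne : n ≠ x := fun h => absurd (h ▸ hdgt n hn) (lt_irrefl x)
        have hcnt_t : t.count n = 0 :=
          List.count_eq_zero.mpr (fun h => hne (ht n h))
        have hxn : ¬ (x = n) := fun h => hne h.symm
        conv_lhs => rw [← hxs]
        simp [List.count_append, hcnt_t, hxn]
      have hpd : d.Pairwise (· ≤ ·) := hpc.2.sublist (List.dropWhile_sublist _)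
      have hdlen : d.length ≤ m := by
        have h1 : d.length ≤ xs.length := (List.dropWhile_sublist (l := xs) _).length_le
        simp at hl; omega
      -- unfold one step of loopA
      have hstep : loopA (x :: xs) (x :: xs) ans [] =
          if 1 < ((x :: xs).count x : Int) then
            loopA (x :: xs) xs (ans ++ [((x :: xs).count x : Int)]) [x]
          else loopA (x :: xs) xs ans [] := by
        simp [loopA]
      by_cases hrun : 0 < t.length
      · have hgt1 : 1 < ((x :: xs).count x : Int) := by
          rw [hcx]; exact_mod_cast Nat.lt_add_of_pos_left hrun
        rw [hstep, if_pos hgt1]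
        have hskip := loopA_skip (x :: xs) t d (ans ++ [((x :: xs).count x : Int)]) [x]
          (fun n hn => by simp [ht n hn])
        rw [hxs] at hskip
        rw [hskip]
        rw [loopA_done_congr (x :: xs) d (ans ++ [((x :: xs).count x : Int)]) [x] []
          (fun n hn => by
            simp only [List.mem_singleton, List.not_mem_nil, iff_false]
            exact fun h => absurd (h ▸ hdgt n hn) (lt_irrefl x))]
        rw [loopA_count_congr (x :: xs) d d (ans ++ [((x :: xs).count x : Int)]) []
          (fun n hn => hcd n hn)]
        rw [ih d hdlen hpd]
        have hsw : sweep (x :: xs) = ((t.length + 1 : Nat) : Int) :: sweep d := by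
          conv_lhs => rw [sweep.eq_def]
          dsimp only
          rw [← ht_def, ← hd_def, if_pos hrun]
        rw [hsw, hcx]
        simp
      · have ht0 : t = [] := List.length_eq_zero_iff.mp (Nat.eq_zero_of_not_pos hrun)
        have hxsd : xs = d := by rw [← hxs, ht0]; simp
        have hngt : ¬ (1 < ((x :: xs).count x : Int)) := by
          rw [hcx, ht0]; simp
        have h2 := loopA_count_congr (x :: xs) d xs ans [] (fun n hn => hcd n (hxsd ▸ hn))
        have hsw : sweep (x :: xs) = sweep d := by
          conv_lhs => rw [sweep.eq_def]
          dsimp only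
          rw [← ht_def, ← hd_def, if_neg hrun]
        rw [hstep, if_neg hngt, hsw, h2, hxsd, ih d hdlen hpd]

theorem solution_0_spec : Claim_equal_solution_0 := by
  intro arr _
  unfold Spec_solution_0 solution_0 solution_0_alt
  have hp : (PySem.List.sorted arr (fun x => x) false).Pairwise (· ≤ ·) :=
    PySem.List.sorted_pairwise arr (fun x => x)
  have h := loopA_eq_sweep (PySem.List.sorted arr (fun x => x) false).length
    (PySem.List.sorted arr (fun x => x) false) le_rfl hp []
  rw [List.nil_append] at h
  simp only [h]
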